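-- pv_equiv track=rewrite | github.com/baicai-1145/GPT-SoVITS-ANE | GPT_SoVITS/TTS_infer_pack/pause_splitter.py | _get_adjacent_lexical_units
-- ===== SOURCE A (Python) =====
-- def _get_adjacent_lexical_units(
--     phone_units: list[dict],
--     split_char_index: int,
--     skip_types: set[str] | None = None,
-- ) -> tuple[dict | None, dict | None]:
--     if skip_types is None:
--         skip_types = {"space", "punct", "prosody"}
--     left_unit = None
--     for unit in reversed(phone_units):
--         if unit.get("unit_type") in skip_types:
--             continue
--         if int(unit.get("char_end", -1)) <= split_char_index:
--             left_unit = unit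
--             break
--     right_unit = None
--     for unit in phone_units:
--         if unit.get("unit_type") in skip_types:
--             continue
--         if int(unit.get("char_start", -1)) >= split_char_index:
--             right_unit = unit
--             break
--     return left_unit, right_unit
-- ===== SOURCE B (Python) =====
-- def _get_adjacent_lexical_units(
--     phone_units,
--     split_char_index,
--     skip_types=None,
-- ):
--     if skip_types is None:
--         skip_types = {"space", "punct", "prosody"}
--     left_unit = None
--     right_unit = None
--     for unit in phone_units:
--         if unit.get("unit_type") in skip_types:
--             continue
--         if int(unit.get("char_end", -1)) <= split_char_index:
--             left_unit = unit
--         if right_unit is None and int(unit.get("char_start", -1)) >= split_char_index: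
--             right_unit = unit
--     return left_unit, right_unit
-- ===== Notes on version B (the rewrite author's own statement) =====
-- stated objective: simpler
-- what changed: A's two sequential scans (a reversed scan with break for the left unit, a forward scan with break for the right) are fused into one forward pass that maintains both results at once: the left unit is overwritten on every qualifying unit (so it ends as the last one, matching the reversed-scan-then-break), the right unit is set only once.
import Mathlib
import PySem

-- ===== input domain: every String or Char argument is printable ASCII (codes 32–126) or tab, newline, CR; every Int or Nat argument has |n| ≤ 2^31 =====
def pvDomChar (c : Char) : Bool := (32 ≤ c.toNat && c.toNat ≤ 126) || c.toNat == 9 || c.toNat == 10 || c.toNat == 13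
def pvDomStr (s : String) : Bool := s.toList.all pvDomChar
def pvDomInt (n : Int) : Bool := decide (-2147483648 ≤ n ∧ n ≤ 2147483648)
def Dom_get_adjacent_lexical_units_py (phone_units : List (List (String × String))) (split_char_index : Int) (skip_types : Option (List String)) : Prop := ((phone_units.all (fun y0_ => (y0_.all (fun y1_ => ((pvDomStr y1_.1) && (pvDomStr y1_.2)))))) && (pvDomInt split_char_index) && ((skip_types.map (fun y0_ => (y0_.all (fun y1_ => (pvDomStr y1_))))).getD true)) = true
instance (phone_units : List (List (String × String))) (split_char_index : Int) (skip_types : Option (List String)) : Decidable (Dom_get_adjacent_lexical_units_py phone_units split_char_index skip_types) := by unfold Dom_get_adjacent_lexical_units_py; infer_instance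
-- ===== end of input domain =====

-- B fuses A's two sequential scans (reversed-with-break for left, forward-with-break for right)
-- into one forward pass maintaining both results; objective: simpler. Equal on Pre_ (all int() calls succeed).


-- ===== PORT A =====
-- unit.get("unit_type") in skip_types  (missing key → None, never in a set of strings)
def pvIsSkip (skips : List String) (u : List (String × String)) : Bool :=
  match u.lookup "unit_type" with
  | some t => skips.contains t
  | none => false

-- int(unit.get(key, -1)); a parse failure is a ValueError, excluded by Pre_ (outside Pre_ the port is unspecified)
def pvFieldInt (u : List (String × String)) (key : String) : Int :=
  match u.lookup key with
  | some s => (PySem.Int.ofStr? s).getD 0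
  | none => -1

-- first loop of A: scan of reversed(phone_units), break on the first non-skipped unit with char_end <= idx
def pvFindLeft (skips : List String) (idx : Int) : List (List (String × String)) → Option (List (String × String))
  | [] => none
  | u :: rest =>
    if pvIsSkip skips u then pvFindLeft skips idx rest
    else if pvFieldInt u "char_end" ≤ idx then some u
    else pvFindLeft skips idx rest

-- second loop of A: forward scan, break on the first non-skipped unit with char_start >= idx
def pvFindRight (skips : List String) (idx : Int) : List (List (String × String)) → Option (List (String × String))
  | [] => none
  | u :: rest =>
    if pvIsSkip skips u then pvFindRight skips idx rest
    else if pvFieldInt u "char_start" ≥ idx then some u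
    else pvFindRight skips idx rest

def get_adjacent_lexical_units_py (phone_units : List (List (String × String))) (split_char_index : Int) (skip_types : Option (List String)) : (Option (List (String × String))) × (Option (List (String × String))) :=
  let skips := skip_types.getD ["space", "punct", "prosody"]
  (pvFindLeft skips split_char_index phone_units.reverse,
   pvFindRight skips split_char_index phone_units)

-- ===== PORT B =====
-- one forward pass: left overwritten on every qualifying unit, right set only while still None
def get_adjacent_lexical_units_py_alt (phone_units : List (List (String × String))) (split_char_index : Int) (skip_types : Option (List String)) : (Option (List (String × String))) × (Option (List (String × String))) :=
  let skips := skip_types.getD ["space", "punct", "prosody"]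
  phone_units.foldl
    (fun acc u =>
      if pvIsSkip skips u then acc
      else
        (if pvFieldInt u "char_end" ≤ split_char_index then some u else acc.1,
         if acc.2.isNone && decide (pvFieldInt u "char_start" ≥ split_char_index) then some u else acc.2))
    (none, none)

-- ===== PRECONDITION & SPEC =====
-- Pre_ excludes inputs where some non-skipped unit carries a "char_end"/"char_start" value int() rejects:
-- there one of the two programs raises ValueError while the other may return first, depending on where its scan breaks.
def Pre_get_adjacent_lexical_units_py (phone_units : List (List (String × String))) (split_char_index : Int) (skip_types : Option (List String)) : Prop :=
  ∀ u ∈ phone_units,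
    pvIsSkip (skip_types.getD ["space", "punct", "prosody"]) u = false →
    ((u.lookup "char_end").all (fun s => (PySem.Int.ofStr? s).isSome)) = true ∧
    ((u.lookup "char_start").all (fun s => (PySem.Int.ofStr? s).isSome)) = true
instance (phone_units : List (List (String × String))) (split_char_index : Int) (skip_types : Option (List String)) : Decidable (Pre_get_adjacent_lexical_units_py phone_units split_char_index skip_types) := by unfold Pre_get_adjacent_lexical_units_py; infer_instance

def pvWitness_get_adjacent_lexical_units_py : (List (List (String × String))) × Int × Option (List String) :=
  ([[("unit_type", "word"), ("char_start", "0"), ("char_end", "2")],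
    [("unit_type", "space")],
    [("unit_type", "word"), ("char_start", "3"), ("char_end", "5")]], 3, none)

def Spec_get_adjacent_lexical_units_py (phone_units : List (List (String × String))) (split_char_index : Int) (skip_types : Option (List String)) (out : (Option (List (String × String))) × (Option (List (String × String)))) : Prop := out = get_adjacent_lexical_units_py_alt phone_units split_char_index skip_types
instance (phone_units : List (List (String × String))) (split_char_index : Int) (skip_types : Option (List String)) (out : (Option (List (String × String))) × (Option (List (String × String)))) : Decidable (Spec_get_adjacent_lexical_units_py phone_units split_char_index skip_types out) := by unfold Spec_get_adjacent_lexical_units_py; infer_instance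

-- ===== CLAIM (what is proved, stated in full; the proofs are below) =====
def Claim_equal_get_adjacent_lexical_units_py : Prop := ∀ (phone_units : List (List (String × String))) (split_char_index : Int) (skip_types : Option (List String)), Dom_get_adjacent_lexical_units_py phone_units split_char_index skip_types → Pre_get_adjacent_lexical_units_py phone_units split_char_index skip_types → Spec_get_adjacent_lexical_units_py phone_units split_char_index skip_types (get_adjacent_lexical_units_py phone_units split_char_index skip_types)

-- ===== LEMMAS AND PROOFS =====

-- the two components of B's fold, taken separately
def pvStepL (skips : List String) (idx : Int) (a : Option (List (String × String))) (u : List (String × String)) : Option (List (String × String)) :=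
  if pvIsSkip skips u then a
  else if pvFieldInt u "char_end" ≤ idx then some u
  else a

def pvStepR (skips : List String) (idx : Int) (b : Option (List (String × String))) (u : List (String × String)) : Option (List (String × String)) :=
  if pvIsSkip skips u then b
  else if b.isNone && decide (pvFieldInt u "char_start" ≥ idx) then some u
  else b

-- B's fold over pairs is the pair of the component folds
theorem pv_fold_pair (skips : List String) (idx : Int) (us : List (List (String × String))) :
    ∀ (a b : Option (List (String × String))),
      us.foldl
        (fun acc u =>
          if pvIsSkip skips u then acc
          else
            (if pvFieldInt u "char_end" ≤ idx then some u else acc.1,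
             if acc.2.isNone && decide (pvFieldInt u "char_start" ≥ idx) then some u else acc.2))
        (a, b)
      = (us.foldl (pvStepL skips idx) a, us.foldl (pvStepR skips idx) b) := by
  induction us with
  | nil => intro a b; rfl
  | cons u rest ih =>
    intro a b
    simp only [List.foldl_cons]
    rw [show (if pvIsSkip skips u then (a, b)
          else (if pvFieldInt u "char_end" ≤ idx then some u else a,
                if b.isNone && decide (pvFieldInt u "char_start" ≥ idx) then some u else b))
        = (pvStepL skips idx a u, pvStepR skips idx b u) from by
      simp only [pvStepL, pvStepR]; split_ifs <;> rfl]
    exact ih _ _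

-- the left fold computes the reversed-scan-with-break
theorem pv_left_lemma (skips : List String) (idx : Int) (us : List (List (String × String))) :
    ∀ (a : Option (List (String × String))),
      us.foldl (pvStepL skips idx) a = (pvFindLeft skips idx us.reverse).or a := by
  induction us using List.reverseRecOn with
  | nil => intro a; rfl
  | append_singleton ys u ih =>
    intro a
    rw [List.foldl_append, List.reverse_append]
    simp only [List.reverse_cons, List.reverse_nil, List.nil_append, List.singleton_append,
      List.foldl_cons, List.foldl_nil]
    rw [ih a]
    simp only [pvFindLeft, pvStepL]
    split_ifs <;> simp [Option.or]

-- an already-found right unit is never overwritten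
theorem pv_stepR_some (skips : List String) (idx : Int) (us : List (List (String × String)))
    (x : List (String × String)) :
    us.foldl (pvStepR skips idx) (some x) = some x := by
  induction us with
  | nil => rfl
  | cons u rest ih =>
    have h : pvStepR skips idx (some x) u = some x := by simp [pvStepR]
    rw [List.foldl_cons, h]; exact ih

-- the right fold computes the forward-scan-with-break
theorem pv_right_lemma (skips : List String) (idx : Int) (us : List (List (String × String))) :
    us.foldl (pvStepR skips idx) none = pvFindRight skips idx us := by
  induction us with
  | nil => rfl
  | cons u rest ih =>
    simp only [List.foldl_cons, pvStepR, pvFindRight, Option.isNone_none, Bool.true_and,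
      decide_eq_true_eq]
    split_ifs with h1 h2
    · exact ih
    · exact pv_stepR_some skips idx rest u
    · exact ih

-- ===== VERDICT (by name: the statement is the Claim_ definition above) =====
theorem get_adjacent_lexical_units_py_spec : Claim_equal_get_adjacent_lexical_units_py := by
  intro phone_units split_char_index skip_types _hDom _hPre
  unfold Spec_get_adjacent_lexical_units_py
  unfold get_adjacent_lexical_units_py get_adjacent_lexical_units_py_alt
  rw [pv_fold_pair, pv_left_lemma, pv_right_lemma, Option.or_none]
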